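-- pv_equiv track=rewrite | github.com/mgtorloni/munchkin-engine | magic_stuff.py | set_occupancy
-- ===== SOURCE A (Python) =====
-- def get_lsb_index(b: int) -> int:
--     """Gets the index of the least significant bit"""
--     return (b & -b).bit_length() - 1
--
-- def set_occupancy(index: int, bits_in_mask: int, attack_mask: int) -> int:
--     """Generates an occupancy bitboard from an index"""
--     occupancy = 0
--     for i in range(bits_in_mask):
--         square = get_lsb_index(attack_mask)
--         attack_mask &= attack_mask - 1
--         if (index & (1 << i)):
--             occupancy |= (1 << square)
--     return occupancy
-- ===== SOURCE B (Python) =====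
-- def set_occupancy(index: int, bits_in_mask: int, attack_mask: int) -> int:
--     """Generates an occupancy bitboard from an index"""
--     squares = []
--     p = 0
--     while len(squares) < bits_in_mask and (attack_mask >> p) != 0:
--         if (attack_mask >> p) & 1:
--             squares.append(p)
--         p += 1
--     return sum(1 << sq for i, sq in enumerate(squares) if (index >> i) & 1)
-- ===== Notes on version B (the rewrite author's own statement) =====
-- stated objective: alternative
-- what changed: B abandons A's LSB-isolation popping ((b&-b).bit_length() plus mask &= mask-1 inside one fused loop): it scans bit positions upward with shift-and-test to stage the list of mask square positions, then builds the result as a sum over enumerate(squares) gated by the index bits.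
import Mathlib
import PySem

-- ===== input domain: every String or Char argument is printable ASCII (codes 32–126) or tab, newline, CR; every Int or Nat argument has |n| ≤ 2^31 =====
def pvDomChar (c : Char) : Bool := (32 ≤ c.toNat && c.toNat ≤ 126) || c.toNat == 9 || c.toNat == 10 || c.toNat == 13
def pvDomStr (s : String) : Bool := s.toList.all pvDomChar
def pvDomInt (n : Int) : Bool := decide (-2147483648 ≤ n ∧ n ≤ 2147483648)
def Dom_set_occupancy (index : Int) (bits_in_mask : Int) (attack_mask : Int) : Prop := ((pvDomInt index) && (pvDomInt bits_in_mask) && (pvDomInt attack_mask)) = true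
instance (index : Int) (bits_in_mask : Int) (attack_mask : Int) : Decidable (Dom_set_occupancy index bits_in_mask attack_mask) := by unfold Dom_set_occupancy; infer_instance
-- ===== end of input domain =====

-- B replaces A's fused LSB-isolation loop ((b & -b).bit_length() plus mask &= mask - 1) by an upward
-- shift-and-test scan that stages the list of square positions, then sums 1 << sq over enumerate(squares)
-- gated by the index bits (objective: alternative).

-- ===== PORT A =====
-- module helper, used verbatim by Python A
def get_lsb_index (b : Int) : Int :=
  (PySem.Int.bitLength (PySem.Int.band b (-b)) : Int) - 1

-- '1 << i': i ≥ 0 on every range element, so '.toNat' is exact; '1 << square': square ≥ 0 whenever the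
-- Python does not raise ValueError — the raising inputs are exactly those excluded by Pre_set_occupancy.
def set_occupancy (index : Int) (bits_in_mask : Int) (attack_mask : Int) : Int :=
  ((PySem.List.pyRange 0 bits_in_mask 1).foldl
    (fun (st : Int × Int) (i : Int) =>
      (if PySem.Int.band index ((1 : Int) <<< i.toNat) ≠ 0
         then PySem.Int.bor st.1 ((1 : Int) <<< (get_lsb_index st.2).toNat) else st.1,
       PySem.Int.band st.2 (st.2 - 1)))
    (0, attack_mask)).1

-- ===== PORT B =====
-- B's while loop; p starts at 0 and only grows, so 'attack_mask >> p' is '>>> p.toNat' exactly.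
-- 'fuel' is a totality guard only: pv_steps_le (below) proves the loop ends within fuel many
-- iterations on every input, so the fuel-exhausted branch is never the one that returns.
def set_occupancy_altScan (bits_in_mask : Int) (attack_mask : Int) :
    Nat → List Int → Int → List Int
  | 0, squares, _ => squares
  | fuel + 1, squares, p =>
    if (squares.length : Int) < bits_in_mask ∧ attack_mask >>> p.toNat ≠ 0 then
      set_occupancy_altScan bits_in_mask attack_mask fuel
        (if PySem.Int.band (attack_mask >>> p.toNat) 1 ≠ 0 then squares ++ [p] else squares)
        (p + 1)
    else squares

-- every staged square is ≥ 0, so '1 << sq' is '<<< sq.toNat' exactly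
def set_occupancy_alt (index : Int) (bits_in_mask : Int) (attack_mask : Int) : Int :=
  let squares := set_occupancy_altScan bits_in_mask attack_mask
    (bits_in_mask.toNat + PySem.Int.bitLength attack_mask + 1) [] 0
  ((PySem.List.enumerate squares 0).map
    (fun isq => if PySem.Int.band (index >>> isq.1.toNat) 1 ≠ 0
                  then (1 : Int) <<< isq.2.toNat else 0)).sum

-- ===== PRECONDITION & SPEC =====
-- Pre_ excludes exactly the inputs on which Python A raises ValueError ('1 << -1'): a nonnegative mask
-- whose popcount is exhausted before the loop ends while the index still has a set bit at an exhausted position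
-- ('every index bit at an exhausted position is clear', written with the quantifier bounded by bitLength index
-- so it is checkable at a glance: bits at positions ≥ bitLength index are all 0 for index ≥ 0 and all 1 otherwise;
-- pv_pre_expand below proves this equal to the unbounded reading).
def Pre_set_occupancy (index : Int) (bits_in_mask : Int) (attack_mask : Int) : Prop :=
  attack_mask < 0 ∨
    ((∀ i : Nat, i < min bits_in_mask.toNat (PySem.Int.bitLength index) →
        PySem.Int.bitCount attack_mask ≤ i → PySem.Int.band (index >>> i) 1 = 0) ∧
     (0 ≤ index ∨
        bits_in_mask.toNat ≤ max (PySem.Int.bitCount attack_mask) (PySem.Int.bitLength index)))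

instance (index : Int) (bits_in_mask : Int) (attack_mask : Int) : Decidable (Pre_set_occupancy index bits_in_mask attack_mask) := by unfold Pre_set_occupancy; infer_instance

def pvWitness_set_occupancy : Int × Int × Int := (5, 3, 22)

def Spec_set_occupancy (index : Int) (bits_in_mask : Int) (attack_mask : Int) (out : Int) : Prop := out = set_occupancy_alt index bits_in_mask attack_mask
instance (index : Int) (bits_in_mask : Int) (attack_mask : Int) (out : Int) : Decidable (Spec_set_occupancy index bits_in_mask attack_mask out) := by unfold Spec_set_occupancy; infer_instance

-- ===== CLAIM (what is proved, stated in full; the proofs are below) =====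
def Claim_equal_set_occupancy : Prop := ∀ (index : Int) (bits_in_mask : Int) (attack_mask : Int), Dom_set_occupancy index bits_in_mask attack_mask → Pre_set_occupancy index bits_in_mask attack_mask → Spec_set_occupancy index bits_in_mask attack_mask (set_occupancy index bits_in_mask attack_mask)


-- ===== LEMMAS AND PROOFS =====

-- ---- generic Nat bit-halving facts ----
lemma pv_nat_and_bit (a b r s : Nat) (hr : r < 2) (hs : s < 2) :
    (2*a+r) &&& (2*b+s) = 2*(a &&& b) + r*s := by
  have hrs : r * s ≤ 1 := by interval_cases r <;> interval_cases s <;> norm_num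
  apply Nat.eq_of_testBit_eq
  intro i
  cases i with
  | zero =>
    simp only [Nat.testBit_zero]
    interval_cases r <;> interval_cases s <;> simp
  | succ i =>
    have h1 : (2*a+r)/2 = a := by omega
    have h2 : (2*b+s)/2 = b := by omega
    have h3 : (2*(a &&& b)+r*s)/2 = a &&& b := by omega
    rw [Nat.testBit_add_one, Nat.and_div_two, h1, h2, Nat.testBit_add_one, h3, Nat.testBit_and]

lemma pv_nat_or_bit (a b r s : Nat) (hr : r < 2) (hs : s < 2) :
    (2*a+r) ||| (2*b+s) = 2*(a ||| b) + (r ||| s) := by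
  have hrs : r ||| s ≤ 1 := by interval_cases r <;> interval_cases s <;> norm_num
  apply Nat.eq_of_testBit_eq
  intro i
  cases i with
  | zero =>
    simp only [Nat.testBit_zero]
    interval_cases r <;> interval_cases s <;> simp
  | succ i =>
    have h1 : (2*a+r)/2 = a := by omega
    have h2 : (2*b+s)/2 = b := by omega
    have h3 : (2*(a ||| b)+(r|||s))/2 = a ||| b := by omega
    rw [Nat.testBit_add_one, Nat.or_div_two, h1, h2, Nat.testBit_add_one, h3, Nat.testBit_or]

lemma pv_nat_or_pow (k : Nat) : ∀ x : Nat, x < 2^k → x ||| 2^k = x + 2^k := by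
  induction k with
  | zero => intro x hx; interval_cases x; decide
  | succ k ih =>
    intro x hx
    have hsplit : x = 2*(x/2) + x % 2 := by omega
    have h2 : (2:Nat)^(k+1) = 2*2^k + 0 := by ring
    rw [hsplit, h2, pv_nat_or_bit _ _ _ _ (by omega) (by omega),
      ih (x/2) (by omega), Nat.or_zero]
    omega

-- ---- Int band/bor halving (two's complement, all signs) ----
lemma pv_band_bit (a b r s : Int) (hr : r = 0 ∨ r = 1) (hs : s = 0 ∨ s = 1) :
    PySem.Int.band (2*a+r) (2*b+s) = 2 * PySem.Int.band a b + r*s := by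
  by_cases ha : 0 ≤ a <;> by_cases hb : 0 ≤ b
  · -- a ≥ 0, b ≥ 0
    simp only [PySem.Int.band, if_pos ha, if_pos hb,
      if_pos (show (0:Int) ≤ 2*a+r by omega), if_pos (show (0:Int) ≤ 2*b+s by omega)]
    have e1 : (2*a+r).toNat = 2*a.toNat + r.toNat := by omega
    have e2 : (2*b+s).toNat = 2*b.toNat + s.toNat := by omega
    rw [e1, e2, pv_nat_and_bit _ _ _ _ (by omega) (by omega)]
    have := Nat.and_le_left (n := a.toNat) (m := b.toNat)
    push_cast
    rcases hr with rfl | rfl <;> rcases hs with rfl | rfl <;> push_cast <;> omega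
  · -- a ≥ 0, b < 0
    simp only [PySem.Int.band, if_pos ha, if_neg hb,
      if_pos (show (0:Int) ≤ 2*a+r by omega), if_neg (show ¬ (0:Int) ≤ 2*b+s by omega)]
    have e1 : (2*a+r).toNat = 2*a.toNat + r.toNat := by omega
    have e2 : (-(2*b+s)-1).toNat = 2*(-b-1).toNat + (1-s).toNat := by omega
    rw [e1, e2, pv_nat_and_bit _ _ _ _ (by omega) (by omega)]
    have h1 := Nat.and_le_left (n := a.toNat) (m := (-b-1).toNat)
    rcases hr with rfl | rfl <;> rcases hs with rfl | rfl <;> push_cast <;> omega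
  · -- a < 0, b ≥ 0
    simp only [PySem.Int.band, if_neg ha, if_pos hb,
      if_neg (show ¬ (0:Int) ≤ 2*a+r by omega), if_pos (show (0:Int) ≤ 2*b+s by omega)]
    have e1 : (2*b+s).toNat = 2*b.toNat + s.toNat := by omega
    have e2 : (-(2*a+r)-1).toNat = 2*(-a-1).toNat + (1-r).toNat := by omega
    rw [e1, e2, pv_nat_and_bit _ _ _ _ (by omega) (by omega)]
    have h1 := Nat.and_le_left (n := b.toNat) (m := (-a-1).toNat)
    rcases hr with rfl | rfl <;> rcases hs with rfl | rfl <;> push_cast <;> omega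
  · -- a < 0, b < 0
    simp only [PySem.Int.band, if_neg ha, if_neg hb,
      if_neg (show ¬ (0:Int) ≤ 2*a+r by omega), if_neg (show ¬ (0:Int) ≤ 2*b+s by omega)]
    have e1 : (-(2*a+r)-1).toNat = 2*(-a-1).toNat + (1-r).toNat := by omega
    have e2 : (-(2*b+s)-1).toNat = 2*(-b-1).toNat + (1-s).toNat := by omega
    rw [e1, e2, pv_nat_or_bit _ _ _ _ (by omega) (by omega)]
    rcases hr with rfl | rfl <;> rcases hs with rfl | rfl <;> push_cast <;> omega

lemma pv_band_halve (x y : Int) :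
    PySem.Int.band x y = 2 * PySem.Int.band (x/2) (y/2) + (x % 2) * (y % 2) := by
  have hx : x = 2*(x/2) + x % 2 := by omega
  have hy : y = 2*(y/2) + y % 2 := by omega
  calc PySem.Int.band x y
      = PySem.Int.band (2*(x/2) + x % 2) (2*(y/2) + y % 2) := by rw [← hx, ← hy]
    _ = 2 * PySem.Int.band (x/2) (y/2) + (x % 2) * (y % 2) :=
        pv_band_bit _ _ _ _ (by omega) (by omega)

-- ---- measure for halving induction ----
def pvMeas (m : Int) : Nat := if 0 ≤ m then m.toNat else (-m-1).toNat

lemma pv_meas_half (m : Int) (h0 : m ≠ 0) (h1 : m ≠ -1) : pvMeas (m/2) < pvMeas m := by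
  unfold pvMeas; split_ifs <;> omega

-- ---- the LSB position ----
def pvQ (m : Int) : Nat :=
  if m = 0 ∨ m % 2 ≠ 0 then 0 else pvQ (m/2) + 1
termination_by pvMeas m
decreasing_by exact pv_meas_half m (by tauto) (by omega)

lemma pvQ_odd (m : Int) (h : m % 2 ≠ 0) : pvQ m = 0 := by
  rw [pvQ]; simp [h]

lemma pvQ_even (m : Int) (h0 : m ≠ 0) (h : m % 2 = 0) : pvQ m = pvQ (m/2) + 1 := by
  rw [pvQ]; simp [h0, h]

lemma pvQ_double (c : Int) (hc : c ≠ 0) : pvQ (2*c) = pvQ c + 1 := by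
  rw [pvQ_even (2*c) (by omega) (by omega)]
  congr 1
  congr 1
  omega

-- band x (~x) = 0
lemma pv_band_not (x : Int) : PySem.Int.band x (-x-1) = 0 := by
  induction hn : pvMeas x using Nat.strong_induction_on generalizing x with
  | _ n ih =>
    by_cases h0 : x = 0
    · subst h0; decide
    by_cases h1 : x = -1
    · subst h1; decide
    have e : (-x-1)/2 = -(x/2)-1 := by omega
    have ep : (-x-1) % 2 = 1 - x % 2 := by omega
    rw [pv_band_halve, e, ep, ih (pvMeas (x/2)) (hn ▸ pv_meas_half x h0 h1) (x/2) rfl]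
    have : x % 2 = 0 ∨ x % 2 = 1 := by omega
    rcases this with h | h <;> rw [h] <;> ring

-- m & -m isolates the lowest set bit
lemma pv_low (m : Int) (hm : m ≠ 0) : PySem.Int.band m (-m) = 2 ^ (pvQ m) := by
  induction hn : pvMeas m using Nat.strong_induction_on generalizing m with
  | _ n ih =>
    by_cases hp : m % 2 ≠ 0
    · have e : (-m)/2 = -(m/2)-1 := by omega
      have ep : (-m) % 2 = 1 := by omega
      rw [pv_band_halve, e, ep, pv_band_not, pvQ_odd m hp]
      have : m % 2 = 1 := by omega
      rw [this]; ring
    · rw [not_not] at hp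
      have hm2 : m / 2 ≠ 0 := by omega
      have e : (-m)/2 = -(m/2) := by omega
      have ep : (-m) % 2 = 0 := by omega
      rw [pv_band_halve, e, ep, hp,
        ih (pvMeas (m/2)) (hn ▸ pv_meas_half m hm (by omega)) (m/2) hm2 rfl,
        pvQ_even m hm hp]
      ring

lemma pv_blpow (k : Nat) : PySem.Int.bitLength ((2:Int)^k) = k + 1 := by
  induction k with
  | zero => decide
  | succ k ih =>
    have hpos : (0:Int) < 2^(k+1) := by positivity
    rw [PySem.Int.bitLength_of_pos hpos,
      PySem.Int.floordiv_eq_ediv_of_pos (by norm_num),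
      show ((2:Int)^(k+1))/2 = 2^k by rw [pow_succ]; omega, ih]

lemma pv_lsb_eq (m : Int) (hm : m ≠ 0) : get_lsb_index m = (pvQ m : Int) := by
  unfold get_lsb_index
  rw [pv_low m hm, pv_blpow]
  push_cast; ring

-- popping the lowest set bit, on the canonical square list
def pvSq (m : Int) (k : Nat) : List Int :=
  if k = 0 then []
  else if m = 0 then []
  else if m % 2 ≠ 0 then 0 :: (pvSq (m/2) (k-1)).map (· + 1)
  else (pvSq (m/2) k).map (· + 1)
termination_by (k, pvMeas m)
decreasing_by
  · exact Prod.Lex.left _ _ (by omega)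
  · exact Prod.Lex.right _ (pv_meas_half m (by tauto) (by omega))

lemma pvSq_zero_k (m : Int) : pvSq m 0 = [] := by rw [pvSq]; simp
lemma pvSq_zero_m (k : Nat) : pvSq 0 k = [] := by rw [pvSq]; simp
lemma pvSq_odd (m : Int) (k : Nat) (h0 : m ≠ 0) (h : m % 2 ≠ 0) :
    pvSq m (k+1) = 0 :: (pvSq (m/2) k).map (· + 1) := by
  rw [pvSq]; simp [h0, h]
lemma pvSq_even (m : Int) (k : Nat) (h0 : m ≠ 0) (h : m % 2 = 0) (hk : k ≠ 0) :
    pvSq m k = (pvSq (m/2) k).map (· + 1) := by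
  rw [pvSq]; simp [h0, h, hk]

lemma pvSq_double (c : Int) (k : Nat) : pvSq (2*c) k = (pvSq c k).map (· + 1) := by
  by_cases hk : k = 0
  · subst hk; rw [pvSq_zero_k, pvSq_zero_k]; rfl
  by_cases hc : c = 0
  · subst hc
    simp [show (2:Int)*0 = 0 by ring, pvSq_zero_m]
  · rw [pvSq_even (2*c) k (by omega) (by omega) hk]
    congr 1
    congr 1
    omega

-- the A-side pop step on the canonical list
lemma pv_pop (m : Int) (k : Nat) (hm : m ≠ 0) :
    pvSq m (k+1) = (pvQ m : Int) :: pvSq (PySem.Int.band m (m-1)) k := by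
  induction hn : pvMeas m using Nat.strong_induction_on generalizing m k with
  | _ n ih =>
    by_cases hp : m % 2 ≠ 0
    · have e : (m-1)/2 = m/2 := by omega
      have ep : (m-1) % 2 = 0 := by omega
      have hband : PySem.Int.band m (m-1) = 2*(m/2) := by
        rw [pv_band_halve, e, ep, PySem.Int.band_self]
        have : m % 2 = 1 := by omega
        rw [this]; ring
      rw [pvSq_odd m k hm hp, hband, pvSq_double, pvQ_odd m hp]
      norm_num
    · rw [not_not] at hp
      have hm2 : m / 2 ≠ 0 := by omega
      have e : (m-1)/2 = m/2 - 1 := by omega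
      have ep : (m-1) % 2 = 1 := by omega
      have hband : PySem.Int.band m (m-1) = 2*(PySem.Int.band (m/2) (m/2-1)) := by
        rw [pv_band_halve, e, ep, hp]; ring
      rw [pvSq_even m (k+1) hm hp (by omega),
        ih (pvMeas (m/2)) (hn ▸ pv_meas_half m hm (by omega)) (m/2) k hm2 rfl,
        hband, pvSq_double, pvQ_even m hm hp]
      push_cast
      norm_num

-- popping strictly increases the LSB position
lemma pv_q_mono (m : Int) (hm : m ≠ 0) (hm' : PySem.Int.band m (m-1) ≠ 0) :
    pvQ m < pvQ (PySem.Int.band m (m-1)) := by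
  induction hn : pvMeas m using Nat.strong_induction_on generalizing m with
  | _ n ih =>
    by_cases hp : m % 2 ≠ 0
    · have hband : PySem.Int.band m (m-1) = 2*(m/2) := by
        rw [pv_band_halve, show (m-1)/2 = m/2 by omega, show (m-1) % 2 = 0 by omega,
          PySem.Int.band_self, show m % 2 = 1 by omega]
        ring
      rw [hband] at hm' ⊢
      rw [pvQ_double (m/2) (by omega), pvQ_odd m hp]
      omega
    · rw [not_not] at hp
      have hm2 : m / 2 ≠ 0 := by omega
      have hband : PySem.Int.band m (m-1) = 2*(PySem.Int.band (m/2) (m/2-1)) := by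
        rw [pv_band_halve, show (m-1)/2 = m/2 - 1 by omega, show (m-1) % 2 = 1 by omega, hp]
        ring
      rw [hband] at hm' ⊢
      have hx : PySem.Int.band (m/2) (m/2-1) ≠ 0 := by
        intro h; rw [h] at hm'; simp at hm'
      rw [pvQ_double _ hx, pvQ_even m hm hp]
      exact Nat.succ_lt_succ (ih (pvMeas (m/2)) (hn ▸ pv_meas_half m hm (by omega)) (m/2) hm2 hx rfl)

-- popping preserves negativity
lemma pv_pop_neg (m : Int) (hm : m < 0) : PySem.Int.band m (m-1) < 0 := by
  induction hn : pvMeas m using Nat.strong_induction_on generalizing m with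
  | _ n ih =>
    by_cases hp : m % 2 ≠ 0
    · rw [pv_band_halve, show (m-1)/2 = m/2 by omega, show (m-1) % 2 = 0 by omega,
        PySem.Int.band_self, show m % 2 = 1 by omega]
      omega
    · rw [not_not] at hp
      rw [pv_band_halve, show (m-1)/2 = m/2 - 1 by omega, show (m-1) % 2 = 1 by omega, hp]
      have := ih (pvMeas (m/2)) (hn ▸ pv_meas_half m (by omega) (by omega)) (m/2) (by omega) rfl
      omega

-- popping decrements the popcount (positive m)
lemma pv_bc_pop (m : Int) (hm : 0 < m) :
    PySem.Int.bitCount m = PySem.Int.bitCount (PySem.Int.band m (m-1)) + 1 := by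
  induction hn : pvMeas m using Nat.strong_induction_on generalizing m with
  | _ n ih =>
    have hbc : PySem.Int.bitCount m = (PySem.Int.mod m 2).toNat + PySem.Int.bitCount (PySem.Int.floordiv m 2) := PySem.Int.bitCount_of_pos hm
    rw [PySem.Int.mod_eq_emod_of_pos (by norm_num),
      PySem.Int.floordiv_eq_ediv_of_pos (by norm_num)] at hbc
    by_cases hp : m % 2 ≠ 0
    · have hband : PySem.Int.band m (m-1) = 2*(m/2) := by
        rw [pv_band_halve, show (m-1)/2 = m/2 by omega, show (m-1) % 2 = 0 by omega,
          PySem.Int.band_self, show m % 2 = 1 by omega]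
        ring
      rw [hband, hbc, show m % 2 = 1 by omega]
      by_cases h2 : m / 2 = 0
      · rw [h2, show (2:Int)*0 = 0 by ring]; decide
      · have hpos : 0 < m / 2 := by omega
        have : PySem.Int.bitCount (2*(m/2)) = PySem.Int.bitCount (m/2) := by
          rw [PySem.Int.bitCount_of_pos (by omega),
            PySem.Int.mod_eq_emod_of_pos (by norm_num),
            PySem.Int.floordiv_eq_ediv_of_pos (by norm_num),
            show (2*(m/2)) % 2 = 0 by omega, show (2*(m/2))/2 = m/2 by omega]
          simp
        rw [this]; omega
    · rw [not_not] at hp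
      have hm2 : 0 < m / 2 := by omega
      have hband : PySem.Int.band m (m-1) = 2*(PySem.Int.band (m/2) (m/2-1)) := by
        rw [pv_band_halve, show (m-1)/2 = m/2 - 1 by omega, show (m-1) % 2 = 1 by omega, hp]
        ring
      have hxnn : 0 ≤ PySem.Int.band (m/2) (m/2-1) :=
        PySem.Int.band_nonneg_of_nonneg_left _ (by omega)
      have hdb : PySem.Int.bitCount (2*(PySem.Int.band (m/2) (m/2-1)))
          = PySem.Int.bitCount (PySem.Int.band (m/2) (m/2-1)) := by
        rcases lt_or_eq_of_le hxnn with hpos | hz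
        · rw [PySem.Int.bitCount_of_pos (by omega),
            PySem.Int.mod_eq_emod_of_pos (by norm_num),
            PySem.Int.floordiv_eq_ediv_of_pos (by norm_num)]
          rw [show (2*(PySem.Int.band (m/2) (m/2-1))) % 2 = 0 by omega,
            show (2*(PySem.Int.band (m/2) (m/2-1)))/2 = PySem.Int.band (m/2) (m/2-1) by omega]
          simp
        · rw [← hz, show (2:Int)*0 = 0 by ring]
      rw [hband, hdb, hbc, hp, show (0:Int).toNat = 0 by rfl,
        ih (pvMeas (m/2)) (hn ▸ pv_meas_half m (by omega) (by omega)) (m/2) hm2 rfl]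
      omega

-- bitLength bounds
lemma pv_bl_le (x : Int) (t : Nat) (h : x.natAbs < 2^t) : PySem.Int.bitLength x ≤ t := by
  by_cases hx : x = 0
  · subst hx; rw [show PySem.Int.bitLength 0 = 0 from by decide]; omega
  · by_contra hlt
    have hlt2 : PySem.Int.bitLength x ≥ t + 1 := by omega
    have h1 := PySem.Int.two_pow_bitLength_le x hx
    have h2 : (2:Nat)^t ≤ 2^(PySem.Int.bitLength x - 1) :=
      Nat.pow_le_pow_right (by norm_num) (by omega)
    omega

lemma pv_bl_half_le (m : Int) : PySem.Int.bitLength (m/2) ≤ PySem.Int.bitLength m := by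
  apply pv_bl_le
  have h1 := PySem.Int.lt_two_pow_bitLength m
  have h2 : (m/2).natAbs ≤ m.natAbs := by omega
  omega

lemma pv_bl_half_lt (m : Int) (h0 : m ≠ 0) (h : m % 2 = 0) :
    PySem.Int.bitLength (m/2) < PySem.Int.bitLength m := by
  have hbl : 1 ≤ PySem.Int.bitLength m := by
    rcases Nat.eq_zero_or_pos (PySem.Int.bitLength m) with hz | hpos
    · exfalso
      have h1 := PySem.Int.lt_two_pow_bitLength m
      rw [hz] at h1
      simp at h1
      omega
    · omega
  have : PySem.Int.bitLength (m/2) ≤ PySem.Int.bitLength m - 1 := by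
    apply pv_bl_le
    have h1 := PySem.Int.lt_two_pow_bitLength m
    have h2 : (m/2).natAbs = m.natAbs / 2 := by omega
    have h3 : (2:Nat)^(PySem.Int.bitLength m) = 2 * 2^(PySem.Int.bitLength m - 1) := by
      rw [← pow_succ']
      congr 1
      omega
    omega
  omega

-- iteration count of B's scan
def pvSteps (m : Int) (k : Nat) : Nat :=
  if k = 0 then 0
  else if m = 0 then 0
  else if m % 2 ≠ 0 then pvSteps (m/2) (k-1) + 1
  else pvSteps (m/2) k + 1
termination_by (k, pvMeas m)
decreasing_by
  · exact Prod.Lex.left _ _ (by omega)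
  · exact Prod.Lex.right _ (pv_meas_half m (by tauto) (by omega))

lemma pv_steps_le_aux (n : Nat) : ∀ (m : Int) (k : Nat), k + pvMeas m ≤ n →
    pvSteps m k ≤ k + PySem.Int.bitLength m := by
  induction n with
  | zero =>
    intro m k h
    have hk : k = 0 := by omega
    subst hk
    rw [pvSteps]
    simp
  | succ n ih =>
    intro m k h
    rw [pvSteps]
    split_ifs with h1 h2 h3
    · omega
    · omega
    · have hmeas : pvMeas (m/2) ≤ pvMeas m := by
        unfold pvMeas; split_ifs <;> omega
      have hrec := ih (m/2) (k-1) (by omega)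
      have hb := pv_bl_half_le m
      omega
    · rw [not_not] at h3
      have hmeas : pvMeas (m/2) < pvMeas m := pv_meas_half m h2 (by omega)
      have hrec := ih (m/2) k (by omega)
      have hb := pv_bl_half_lt m h2 h3
      omega

lemma pv_steps_le (m : Int) (k : Nat) : pvSteps m k ≤ k + PySem.Int.bitLength m :=
  pv_steps_le_aux (k + pvMeas m) m k (le_refl _)

-- shift composition and trivia
lemma pv_shift_comp (x : Int) (a b : Nat) : (x >>> a) >>> b = x >>> (a + b) := by
  rw [Int.shiftRight_eq_div_pow, Int.shiftRight_eq_div_pow, Int.shiftRight_eq_div_pow, pow_add]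
  push_cast
  rw [Int.ediv_ediv_of_nonneg]
  positivity

lemma pv_shift_zero (x : Int) : x >>> (0 : Nat) = x := by
  rw [Int.shiftRight_eq_div_pow]; simp

lemma pv_shift_one (x : Int) : x >>> (1 : Nat) = x / 2 := by
  rw [Int.shiftRight_eq_div_pow]; norm_num

lemma pv_band_one_emod (x : Int) : PySem.Int.band x 1 = x % 2 := by
  rw [PySem.Int.band_one, PySem.Int.mod_eq_emod_of_pos (by norm_num)]

-- disjoint bor is addition
lemma pv_bor_pow (occ : Int) (k : Nat) (h0 : 0 ≤ occ) (h : occ < 2^k) :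
    PySem.Int.bor occ ((1:Int) <<< k) = occ + 2^k := by
  have hs : (1:Int) <<< k = 2^k := by rw [Int.shiftLeft_eq]; ring
  rw [hs, PySem.Int.bor_of_nonneg h0 (by positivity)]
  have ht : ((2:Int)^k).toNat = 2^k := by
    have : ((2:Int)^k) = ((2^k : Nat) : Int) := by push_cast; ring
    omega
  rw [ht, pv_nat_or_pow k occ.toNat (by omega)]
  push_cast
  omega

-- ---- A's loop, re-indexed: shift the index right once per step ----
def pvLoopA (n : Nat) (index attack occ : Int) : Int :=
  match n with
  | 0 => occ
  | n + 1 =>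
    pvLoopA n (index >>> (1 : Nat)) (PySem.Int.band attack (attack - 1))
      (if PySem.Int.band index 1 ≠ 0
         then PySem.Int.bor occ ((1 : Int) <<< (get_lsb_index attack).toNat) else occ)

lemma pv_band_two_mul (a b : Int) :
    PySem.Int.band a (2 * b) = 2 * PySem.Int.band (a >>> (1 : Nat)) b := by
  rw [pv_shift_one, pv_band_halve a (2*b), show (2*b) % 2 = 0 by omega,
    show (2*b)/2 = b by omega]
  ring

lemma pv_foldA (n : Nat) (index attack occ : Int) :
    ((List.range n).foldl
      (fun (st : Int × Int) (k : Nat) =>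
        (if PySem.Int.band index ((1 : Int) <<< k) ≠ 0
           then PySem.Int.bor st.1 ((1 : Int) <<< (get_lsb_index st.2).toNat) else st.1,
         PySem.Int.band st.2 (st.2 - 1)))
      (occ, attack)).1 = pvLoopA n index attack occ := by
  induction n generalizing index attack occ with
  | zero => simp [pvLoopA]
  | succ n ih =>
    rw [List.range_succ_eq_map]
    simp only [List.foldl_cons, List.foldl_map]
    have hstep : (fun (st : Int × Int) (k : Nat) =>
        (if PySem.Int.band index ((1 : Int) <<< (Nat.succ k)) ≠ 0
           then PySem.Int.bor st.1 ((1 : Int) <<< (get_lsb_index st.2).toNat) else st.1,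
         PySem.Int.band st.2 (st.2 - 1)))
        = (fun (st : Int × Int) (k : Nat) =>
        (if PySem.Int.band (index >>> (1 : Nat)) ((1 : Int) <<< k) ≠ 0
           then PySem.Int.bor st.1 ((1 : Int) <<< (get_lsb_index st.2).toNat) else st.1,
         PySem.Int.band st.2 (st.2 - 1))) := by
      funext st k
      have hsh : (1 : Int) <<< (Nat.succ k) = 2 * ((1 : Int) <<< k) := by
        simp [Int.shiftLeft_eq]; ring
      rw [hsh, pv_band_two_mul index _]
      simp [mul_eq_zero]
    rw [hstep]
    simp only [pvLoopA]
    rw [← ih (index >>> (1 : Nat))]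
    have h10 : (1 : Int) <<< (0 : Nat) = 1 := by decide
    rw [h10]

-- exhausted mask: a loop with all remaining index bits clear leaves occ unchanged
lemma pv_loopA_zero (n : Nat) (index occ : Int)
    (h : ∀ i : Nat, i < n → PySem.Int.band (index >>> i) 1 = 0) :
    pvLoopA n index 0 occ = occ := by
  induction n generalizing index occ with
  | zero => rfl
  | succ n ih =>
    simp only [pvLoopA]
    have h0 : PySem.Int.band index 1 = 0 := by
      have := h 0 (by omega)
      rwa [pv_shift_zero] at this
    rw [if_neg (by simp [h0]), show PySem.Int.band 0 (0-1) = 0 from by decide]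
    apply ih
    intro i hi
    rw [pv_shift_comp, Nat.add_comm]
    exact h (i+1) (by omega)

-- B's per-bit sum over a square list
def pvSum (idx : Int) : List Int → Int
  | [] => 0
  | s :: r =>
    (if PySem.Int.band idx 1 ≠ 0 then (1:Int) <<< s.toNat else 0) + pvSum (idx >>> (1:Nat)) r

-- the main A-side invariant: A's loop computes the gated sum over the canonical square list
lemma pv_loopA_eq_sum (n : Nat) :
    ∀ (index m occ : Int),
      (m < 0 ∨ (0 ≤ m ∧ ∀ i : Nat, i < n → PySem.Int.bitCount m ≤ i →
        PySem.Int.band (index >>> i) 1 = 0)) →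
      0 ≤ occ → (m ≠ 0 → occ < 2 ^ (pvQ m)) →
      pvLoopA n index m occ = occ + pvSum index (pvSq m n) := by
  induction n with
  | zero => intro index m occ _ _ _; simp [pvLoopA, pvSq_zero_k, pvSum]
  | succ n ih =>
    intro index m occ hm hocc hbnd
    by_cases hm0 : m = 0
    · subst hm0
      rw [pvSq_zero_m, pv_loopA_zero]
      · simp [pvSum]
      · rcases hm with h | ⟨_, h⟩
        · omega
        · intro i hi
          exact h i hi (by rw [show PySem.Int.bitCount 0 = 0 from by decide]; omega)
    · have hq := pv_lsb_eq m hm0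
      have hqn : (get_lsb_index m).toNat = pvQ m := by rw [hq]; omega
      have hocc' : (if PySem.Int.band index 1 ≠ 0
          then PySem.Int.bor occ ((1 : Int) <<< (get_lsb_index m).toNat) else occ)
          = occ + (if PySem.Int.band index 1 ≠ 0 then (1:Int) <<< (pvQ m) else 0) := by
        by_cases hbit : PySem.Int.band index 1 ≠ 0
        · rw [if_pos hbit, if_pos hbit, hqn, pv_bor_pow occ _ hocc (hbnd hm0),
            Int.shiftLeft_eq]
          ring
        · rw [if_neg hbit, if_neg hbit]; ring
      simp only [pvLoopA]
      rw [hocc', pv_pop m n hm0, pvSum]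
      have hhead : (if PySem.Int.band index 1 ≠ 0
          then (1:Int) <<< ((pvQ m : Int)).toNat else 0)
          = (if PySem.Int.band index 1 ≠ 0 then (1:Int) <<< (pvQ m) else 0) := by
        norm_num
      rw [hhead]
      have hstep : pvLoopA n (index >>> (1:Nat)) (PySem.Int.band m (m-1))
          (occ + (if PySem.Int.band index 1 ≠ 0 then (1:Int) <<< (pvQ m) else 0))
          = (occ + (if PySem.Int.band index 1 ≠ 0 then (1:Int) <<< (pvQ m) else 0))
            + pvSum (index >>> (1:Nat)) (pvSq (PySem.Int.band m (m-1)) n) := by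
        apply ih
        · rcases hm with hneg | ⟨hnn, h⟩
          · exact Or.inl (pv_pop_neg m hneg)
          · right
            refine ⟨PySem.Int.band_nonneg_of_nonneg_left _ hnn, ?_⟩
            intro i hi hbc
            have hmpos : 0 < m := by omega
            have hbcm := pv_bc_pop m hmpos
            rw [pv_shift_comp, Nat.add_comm]
            exact h (i+1) (by omega) (by omega)
        · have : (0:Int) ≤ (if PySem.Int.band index 1 ≠ 0 then (1:Int) <<< (pvQ m) else 0) := by
            split_ifs
            · rw [Int.shiftLeft_eq]; positivity
            · omega
          omega
        · intro hm'0
          have hmono := pv_q_mono m hm0 hm'0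
          have h1 : occ + (if PySem.Int.band index 1 ≠ 0 then (1:Int) <<< (pvQ m) else 0)
              < 2 ^ (pvQ m + 1) := by
            have hsl : (1:Int) <<< (pvQ m) = 2 ^ (pvQ m) := by rw [Int.shiftLeft_eq]; ring
            have hb := hbnd hm0
            have h2q : (2:Int)^(pvQ m + 1) = 2^(pvQ m) + 2^(pvQ m) := by ring
            split_ifs with hcond
            · rw [hsl]; omega
            · omega
          have h2 : (2:Int) ^ (pvQ m + 1) ≤ 2 ^ (pvQ (PySem.Int.band m (m-1))) :=
            pow_le_pow_right₀ (by norm_num) (by omega)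
          omega
      rw [hstep]
      ring

-- ---- B side: the scan stages exactly the canonical square list ----
lemma pv_scan_eq (bits m : Int) :
    ∀ (fuel : Nat) (sq : List Int) (p : Int), 0 ≤ p →
      pvSteps (m >>> p.toNat) (bits.toNat - sq.length) ≤ fuel →
      set_occupancy_altScan bits m fuel sq p
        = sq ++ (pvSq (m >>> p.toNat) (bits.toNat - sq.length)).map (· + p) := by
  intro fuel
  induction fuel with
  | zero =>
    intro sq p hp hf
    rw [set_occupancy_altScan]
    by_cases hc : (sq.length : Int) < bits ∧ m >>> p.toNat ≠ 0
    · exfalso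
      rw [pvSteps] at hf
      have hk : bits.toNat - sq.length ≠ 0 := by omega
      simp only [hk, hc.2] at hf
      split_ifs at hf <;> omega
    · rcases not_and_or.mp hc with h | h
      · rw [show bits.toNat - sq.length = 0 by omega, pvSq_zero_k]
        simp
      · rw [not_not] at h
        rw [h, pvSq_zero_m]
        simp
  | succ fuel ih =>
    intro sq p hp hf
    rw [set_occupancy_altScan]
    by_cases hc : (sq.length : Int) < bits ∧ m >>> p.toNat ≠ 0
    · rw [if_pos hc]
      obtain ⟨hlen, hmp⟩ := hc
      have hk : bits.toNat - sq.length ≠ 0 := by omega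
      have hpn : (p+1).toNat = p.toNat + 1 := by omega
      have hshift : m >>> (p+1).toNat = (m >>> p.toNat) >>> (1:Nat) := by
        rw [pv_shift_comp, hpn]
      have hsteps : pvSteps (m >>> p.toNat) (bits.toNat - sq.length)
          = (if (m >>> p.toNat) % 2 ≠ 0
              then pvSteps ((m >>> p.toNat)/2) (bits.toNat - sq.length - 1)
              else pvSteps ((m >>> p.toNat)/2) (bits.toNat - sq.length)) + 1 := by
        rw [pvSteps]
        simp only [hk, hmp]
        split_ifs <;> simp_all
      by_cases hb : PySem.Int.band (m >>> p.toNat) 1 ≠ 0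
      · rw [if_pos hb]
        have hodd : (m >>> p.toNat) % 2 ≠ 0 := by
          rw [pv_band_one_emod] at hb; exact hb
        rw [ih (sq ++ [p]) (p+1) (by omega) ?_]
        · rw [hshift, pv_shift_one]
          rw [show bits.toNat - (sq ++ [p]).length = bits.toNat - sq.length - 1 by
            simp; omega]
          rw [show bits.toNat - sq.length = (bits.toNat - sq.length - 1) + 1 by omega,
            pvSq_odd _ _ hmp hodd]
          simp only [List.map_cons, List.map_map, List.append_assoc,
            List.singleton_append, zero_add]
          congr 2
          · congr 1
            funext x
            simp
            ring
        · rw [hshift, pv_shift_one,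
            show bits.toNat - (sq ++ [p]).length = bits.toNat - sq.length - 1 by simp; omega]
          rw [hsteps, if_pos hodd] at hf
          omega
      · rw [if_neg hb]
        have heven : (m >>> p.toNat) % 2 = 0 := by
          rw [pv_band_one_emod] at hb; simpa using hb
        rw [ih sq (p+1) (by omega) ?_]
        · rw [hshift, pv_shift_one,
            pvSq_even (m >>> p.toNat) _ hmp heven hk]
          congr 1
          simp only [List.map_map]
          congr 1
          funext x
          simp
          ring
        · rw [hshift, pv_shift_one]
          rw [hsteps, if_neg (by simpa using heven)] at hf
          omega
    · rw [if_neg hc]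
      rcases not_and_or.mp hc with h | h
      · rw [show bits.toNat - sq.length = 0 by omega, pvSq_zero_k]
        simp
      · rw [not_not] at h
        rw [h, pvSq_zero_m]
        simp

-- the enumerate-sum is pvSum
lemma pv_enum_sum (index : Int) :
    ∀ (sq : List Int) (s : Int), 0 ≤ s →
      ((PySem.List.enumerate sq s).map
        (fun isq => if PySem.Int.band (index >>> isq.1.toNat) 1 ≠ 0
                      then (1 : Int) <<< isq.2.toNat else 0)).sum
      = pvSum (index >>> s.toNat) sq := by
  intro sq
  induction sq with
  | nil => intro s hs; simp [PySem.List.enumerate_nil, pvSum]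
  | cons x r ih =>
    intro s hs
    rw [PySem.List.enumerate_cons, List.map_cons, List.sum_cons, pvSum,
      ih (s+1) (by omega)]
    have : index >>> (s+1).toNat = (index >>> s.toNat) >>> (1:Nat) := by
      rw [pv_shift_comp, show (s+1).toNat = s.toNat + 1 by omega]
    rw [this]
    rw [show ((s, x).1 : Int) = s from rfl, show ((s, x).2 : Int) = x from rfl,
      Int.shiftRight_natCast_right, Int.shiftLeft_natCast_right]

-- high bits: positions at or above bitLength are the sign bit
lemma pv_high_bit_nonneg (x : Int) (hx : 0 ≤ x) (i : Nat)
    (hi : PySem.Int.bitLength x ≤ i) : PySem.Int.band (x >>> i) 1 = 0 := by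
  have h1 := PySem.Int.lt_two_pow_bitLength x
  have h2 : (2:Nat)^(PySem.Int.bitLength x) ≤ 2^i := Nat.pow_le_pow_right (by norm_num) hi
  have hlt : x < 2^i := by
    have : ((2:Nat)^i : Int) = (2:Int)^i := by push_cast; ring
    omega
  rw [Int.shiftRight_eq_div_pow]
  push_cast
  rw [Int.ediv_eq_zero_of_lt hx hlt]
  decide

-- the bounded Pre_ form expands to the unbounded reading used by the loop invariant
lemma pv_pre_expand (index bits_in_mask attack_mask : Int)
    (h : Pre_set_occupancy index bits_in_mask attack_mask) :
    attack_mask < 0 ∨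
      ∀ i : Nat, i < bits_in_mask.toNat → PySem.Int.bitCount attack_mask ≤ i →
        PySem.Int.band (index >>> i) 1 = 0 := by
  rcases h with h | ⟨h1, h2⟩
  · exact Or.inl h
  · right
    intro i hi hc
    by_cases hiL : i < PySem.Int.bitLength index
    · exact h1 i (by omega) hc
    · rcases h2 with hx | hB
      · exact pv_high_bit_nonneg index hx i (by omega)
      · exfalso
        omega

-- B's port computes the gated sum over the canonical square list
lemma pv_alt_eq_sum (index bits m : Int) :
    set_occupancy_alt index bits m = pvSum index (pvSq m bits.toNat) := by
  unfold set_occupancy_alt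
  rw [pv_scan_eq bits m _ [] 0 (by omega) ?_]
  · rw [show (0:Int).toNat = 0 from rfl, pv_shift_zero]
    simp only [List.length_nil, Nat.sub_zero, List.nil_append]
    rw [show (pvSq m bits.toNat).map (· + 0) = pvSq m bits.toNat by simp]
    rw [pv_enum_sum index _ 0 (by omega)]
    simp
  · rw [show (0:Int).toNat = 0 from rfl, pv_shift_zero]
    have := pv_steps_le m (bits.toNat - ([] : List Int).length)
    simp at this ⊢
    omega

-- ===== VERDICT (by name: the statement is the Claim_ definition above) =====
theorem set_occupancy_spec : Claim_equal_set_occupancy := by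
  intro index bits attack _ hpre
  unfold Spec_set_occupancy set_occupancy
  rw [PySem.List.pyRange_one, List.foldl_map]
  simp only [zero_add, Int.sub_zero, Int.toNat_natCast]
  rw [pv_foldA bits.toNat index attack 0, pv_alt_eq_sum index bits attack]
  rw [pv_loopA_eq_sum bits.toNat index attack 0 ?_ (by omega) (fun _ => by positivity)]
  · ring
  · rcases pv_pre_expand index bits attack hpre with h | h
    · exact Or.inl h
    · by_cases hneg : attack < 0
      · exact Or.inl hneg
      · exact Or.inr ⟨by omega, h⟩
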